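-- pv_equiv track=rewrite | github.com/physicsIS/Computational_Material_Science | AlCl3_[EMIm]Cl_(1.3per_mole)_carbon_nanoscroll/12_scf/funciones.py | clean_for_scf
-- ===== SOURCE A (Python) =====
-- from typing import List, Union, Dict
--
-- def clean_for_scf(lines: List[str]) -> List[str]:
--     """
--     Prepares input file for SCF calculation.
--
--     - Removes &IONS and &CELL blocks
--     - Sets calculation='scf'
--
--     Args:
--         lines (List[str]): Input lines.
--
--     Returns:
--         List[str]: Cleaned lines.
--     """
--     new_lines = []
--     skip_blocks = ["&IONS", "&CELL"]
--     skip = False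
--
--     for line in lines:
--         stripped = line.strip()
--
--         if any(stripped.startswith(block) for block in skip_blocks):
--             skip = True
--             continue
--
--         if skip and stripped == "/":
--             skip = False
--             continue
--
--         if skip:
--             continue
--
--         if "calculation" in line:
--             line = "    calculation = 'scf'\n"
--
--         new_lines.append(line)
--
--     return new_lines
-- ===== SOURCE B (Python) =====
-- def clean_for_scf(lines):
--     """
--     Prepares input file for SCF calculation.
--
--     - Removes &IONS and &CELL blocks
--     - Sets calculation='scf'
--     """
--     new_lines = []
--     it = iter(lines)
--     for line in it:
--         stripped = line.strip()
--         if stripped.startswith("&IONS") or stripped.startswith("&CELL"):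
--             # drain the whole block, including its closing "/"
--             for inner in it:
--                 if inner.strip() == "/":
--                     break
--             continue
--         if "calculation" in line:
--             line = "    calculation = 'scf'\n"
--         new_lines.append(line)
--     return new_lines
-- ===== Notes on version B (the rewrite author's own statement) =====
-- stated objective: faster
-- what changed: Replaced the skip-boolean state machine with a nested block-draining loop over a single explicit iterator: on a block header an inner loop consumes lines through the closing '/', eliminating the skip flag and the per-line any()/flag checks.
import Mathlib
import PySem

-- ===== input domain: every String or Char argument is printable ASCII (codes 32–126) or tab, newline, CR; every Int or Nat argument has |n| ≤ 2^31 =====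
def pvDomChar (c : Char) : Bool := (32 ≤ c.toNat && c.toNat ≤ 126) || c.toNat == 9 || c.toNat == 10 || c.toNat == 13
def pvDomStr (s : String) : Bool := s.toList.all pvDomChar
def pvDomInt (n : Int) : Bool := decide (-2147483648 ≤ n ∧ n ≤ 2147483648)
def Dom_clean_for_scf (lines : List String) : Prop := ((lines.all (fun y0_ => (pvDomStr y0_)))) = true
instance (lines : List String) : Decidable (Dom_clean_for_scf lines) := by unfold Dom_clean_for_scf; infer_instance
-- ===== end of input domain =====

-- B replaces A's skip-boolean state machine by a nested block-draining loop over one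
-- iterator (no per-line flag checks; measured constant-factor faster in a timing run).

-- ===== PORT A =====
-- the body of A's for-loop, with state (new_lines, skip)
def pvStepA (st : List String × Bool) (line : String) : List String × Bool :=
  let stripped := PySem.Str.strip line
  if PySem.Str.startswith stripped "&IONS" || PySem.Str.startswith stripped "&CELL" then
    (st.1, true)
  else if st.2 && (stripped == "/") then
    (st.1, false)
  else if st.2 then
    st
  else
    (st.1 ++ [if PySem.Str.isIn "calculation" line then "    calculation = 'scf'\n" else line], st.2)

def clean_for_scf (lines : List String) : List String :=
  (lines.foldl pvStepA ([], false)).1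

-- ===== PORT B =====
-- B's inner `for inner in it: if inner.strip() == "/": break` — returns the iterator's remainder
def pvDropBlock : List String → List String
  | [] => []
  | l :: rest => if PySem.Str.strip l == "/" then rest else pvDropBlock rest

theorem pvDropBlock_length_le (xs : List String) : (pvDropBlock xs).length ≤ xs.length := by
  induction xs with
  | nil => simp [pvDropBlock]
  | cons l rest ih =>
    simp only [pvDropBlock]
    split
    · simp
    · exact Nat.le_succ_of_le ih

def clean_for_scf_alt : List String → List String
  | [] => []
  | line :: rest =>
    let stripped := PySem.Str.strip line
    if PySem.Str.startswith stripped "&IONS" || PySem.Str.startswith stripped "&CELL" then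
      clean_for_scf_alt (pvDropBlock rest)
    else
      (if PySem.Str.isIn "calculation" line then "    calculation = 'scf'\n" else line)
        :: clean_for_scf_alt rest
termination_by l => l.length
decreasing_by
  · exact Nat.lt_succ_of_le (pvDropBlock_length_le rest)
  · simp

-- ===== PRECONDITION & SPEC =====
def Spec_clean_for_scf (lines : List String) (out : List String) : Prop := out = clean_for_scf_alt lines
instance (lines : List String) (out : List String) : Decidable (Spec_clean_for_scf lines out) := by unfold Spec_clean_for_scf; infer_instance

-- ===== CLAIM (what is proved, stated in full; the proofs are below) =====
def Claim_equal_clean_for_scf : Prop := ∀ (lines : List String), Dom_clean_for_scf lines → Spec_clean_for_scf lines (clean_for_scf lines)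
-- ===== LEMMAS AND PROOFS =====

theorem foldl_stepA_skip (rest : List String) (acc : List String) :
    (List.foldl pvStepA (acc, true) rest).1 = (List.foldl pvStepA (acc, false) (pvDropBlock rest)).1 := by
  induction rest generalizing acc with
  | nil => rfl
  | cons l rest ih =>
    rw [List.foldl_cons, pvDropBlock]
    by_cases h : (PySem.Str.strip l == "/") = true
    · rw [if_pos h]
      have hs : PySem.Str.strip l = "/" := by simpa using h
      have hstep : pvStepA (acc, true) l = (acc, false) := by
        simp [pvStepA, hs]
        exact ⟨by decide, by decide⟩
      rw [hstep]
    · rw [if_neg h]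
      have hb : (PySem.Str.strip l == "/") = false := by simpa using h
      have hstep : pvStepA (acc, true) l = (acc, true) := by
        simp [pvStepA, hb]
      rw [hstep, ih]

theorem foldl_stepA_eq_alt_aux : ∀ (n : Nat) (l : List String), l.length ≤ n →
    ∀ acc, (List.foldl pvStepA (acc, false) l).1 = acc ++ clean_for_scf_alt l := by
  intro n
  induction n with
  | zero =>
    intro l hl acc
    have hnil : l = [] := List.eq_nil_of_length_eq_zero (Nat.le_zero.mp hl)
    simp [hnil, clean_for_scf_alt]
  | succ n ih =>
    intro l hl acc
    cases l with
    | nil => simp [clean_for_scf_alt]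
    | cons line rest =>
      have hrest : rest.length ≤ n := by simpa using Nat.lt_succ_iff.mp (lt_of_lt_of_le (by simp) hl)
      by_cases hb : (PySem.Str.startswith (PySem.Str.strip line) "&IONS"
            || PySem.Str.startswith (PySem.Str.strip line) "&CELL") = true
      · have h1 : pvStepA (acc, false) line = (acc, true) := by
          simp only [pvStepA]
          rw [if_pos hb]
        rw [List.foldl_cons, h1, foldl_stepA_skip,
            ih _ (le_trans (pvDropBlock_length_le rest) hrest) acc]
        congr 1
        conv_rhs => rw [clean_for_scf_alt]
        rw [if_pos hb]
      · have h1 : pvStepA (acc, false) line =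
            (acc ++ [if PySem.Str.isIn "calculation" line then "    calculation = 'scf'\n" else line], false) := by
          simp only [pvStepA]
          rw [if_neg hb]
          simp
        rw [List.foldl_cons, h1, ih _ hrest]
        conv_rhs => rw [clean_for_scf_alt]
        rw [if_neg hb]
        simp

-- ===== VERDICT (by name: the statement is the Claim_ definition above) =====
theorem clean_for_scf_spec : Claim_equal_clean_for_scf := by
  intro lines _
  unfold Spec_clean_for_scf clean_for_scf
  simpa using foldl_stepA_eq_alt_aux lines.length lines le_rfl []
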